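-- pv_equiv track=rewrite | github.com/princeelector/toy-problems | Python/IDfromPrimeNums/id_from_prime_nums.py | solution
-- ===== SOURCE A (Python) =====
-- def solution(i):
--     if not(i >= 0 and i <= 10000): return
--
--     prime_numbers_str = ''
--     prime_numbers_list = []
--     x = 1
--
--     while len(prime_numbers_str) < 10005:
--         x += 1
--         not_prime = False
--
--         if len(prime_numbers_list) > 0:
--             for y in prime_numbers_list:
--                 if x % y == 0:
--                     not_prime = True
--                     break
--                 else: continue
--
--         if not_prime: continue
--         if not x == 2 and x % 2 == 0: continue
--         if sum(list(map(int,str(x)))) % 3 == 0 and x != 3: continue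
--
--         prime_numbers_str += str(x)
--         prime_numbers_list.append(x)
--
--     return prime_numbers_str[i:i+5]
-- ===== SOURCE B (Python) =====
-- def _is_prime(x):
--     if x < 2:
--         return False
--     d = 2
--     while d * d <= x:
--         if x % d == 0:
--             return False
--         d += 1
--     return True
--
--
-- def solution(i):
--     if i < 0 or i > 10000:
--         return None
--     parts = []
--     total = 0
--     x = 2
--     while total < 10005:
--         if _is_prime(x):
--             s = str(x)
--             parts.append(s)
--             total += len(s)
--         x += 1
--     return ''.join(parts)[i:i+5]
-- ===== Notes on version B (the rewrite author's own statement) =====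
-- stated objective: faster
-- what changed: Replaces A's trial division of each candidate by the whole list of previously found primes (plus redundant even and digit-sum-mod-3 filters) with a self-contained primality test by trial division up to sqrt(x), accumulating string parts with a length counter and joining once at the end.
import Mathlib
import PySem

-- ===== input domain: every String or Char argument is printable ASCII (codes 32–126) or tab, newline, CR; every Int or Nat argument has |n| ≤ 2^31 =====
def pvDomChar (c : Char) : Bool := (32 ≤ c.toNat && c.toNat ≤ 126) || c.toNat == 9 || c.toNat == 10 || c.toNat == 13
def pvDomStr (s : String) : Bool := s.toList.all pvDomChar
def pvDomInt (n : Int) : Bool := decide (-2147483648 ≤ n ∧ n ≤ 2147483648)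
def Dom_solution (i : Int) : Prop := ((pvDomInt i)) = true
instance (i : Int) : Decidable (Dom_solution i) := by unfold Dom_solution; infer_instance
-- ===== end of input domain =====

-- B replaces A's per-candidate scan of the whole list of previously found primes (plus A's
-- redundant even/digit-sum filters) by trial division up to sqrt(x): far fewer divisions per candidate.

-- ===== PORT A =====
-- sum(list(map(int, str(x)))): int(c) on a digit character of str(x); it never raises there,
-- so the `getD 0` default is unreachable (exact on all reachable inputs).
def aDigitSum (x : Int) : Int :=
  ((PySem.Int.toChars x).map (fun c => (PySem.Int.ofChars? [c]).getD 0)).sum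

-- the `while len(prime_numbers_str) < 10005` loop; one fuel step = one iteration (one x);
-- fuel 30000 is never exhausted on the real run (the loop stops after 20230 iterations),
-- it only makes the recursion structural.  The for-with-break over the prime list is List.any.
def aLoop : Nat → List Char → List Int → Int → List Char
  | 0, s, _, _ => s
  | fuel+1, s, pl, x =>
    if PySem.List.len s < 10005 then
      let x' := x + 1
      let notPrime : Bool :=
        if PySem.List.len pl > 0 then pl.any (fun y => PySem.Int.mod x' y == 0) else false
      if notPrime then aLoop fuel s pl x'
      else if (!(x' == 2)) && (PySem.Int.mod x' 2 == 0) then aLoop fuel s pl x'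
      else if (PySem.Int.mod (aDigitSum x') 3 == 0) && (!(x' == 3)) then aLoop fuel s pl x'
      else aLoop fuel (s ++ PySem.Int.toChars x') (pl ++ [x']) x'
    else s

def solution (i : Int) : Option String :=
  if ¬(i ≥ 0 ∧ i ≤ 10000) then none
  else
    some (String.ofList (PySem.List.slice (aLoop 30000 [] [] 1) (some i) (some (i + 5))))

-- ===== PORT B =====
-- `while d*d <= x` of _is_prime; the extra `2 ≤ d` conjunct only makes the recursion
-- well-founded (the loop always starts at d = 2 and increments, so it is always true there).
def isPrimeLoop (x d : Int) : Bool :=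
  if h : 2 ≤ d ∧ d * d ≤ x then
    if PySem.Int.mod x d == 0 then false else isPrimeLoop x (d + 1)
  else true
  termination_by (x - d).toNat
  decreasing_by
    have h2 : 2 * d ≤ d * d := by nlinarith [h.1]
    have := h.2
    omega

def isPrime (x : Int) : Bool :=
  if x < 2 then false else isPrimeLoop x 2

-- `while total < 10005`; fuel 30000 is never exhausted on the real run (20230 iterations).
def bLoop : Nat → List (List Char) → Int → Int → List (List Char)
  | 0, parts, _, _ => parts
  | fuel+1, parts, total, x =>
    if total < 10005 then
      if isPrime x then
        bLoop fuel (parts ++ [PySem.Int.toChars x])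
          (total + PySem.List.len (PySem.Int.toChars x)) (x + 1)
      else bLoop fuel parts total (x + 1)
    else parts

def solution_alt (i : Int) : Option String :=
  if i < 0 ∨ i > 10000 then none
  else
    some (String.ofList (PySem.List.slice ((bLoop 30000 [] 0 2).flatten)
      (some i) (some (i + 5))))

-- ===== PRECONDITION & SPEC =====
def Spec_solution (i : Int) (out : Option String) : Prop := out = solution_alt i
instance (i : Int) (out : Option String) : Decidable (Spec_solution i out) := by unfold Spec_solution; infer_instance

-- ===== CLAIM (what is proved, stated in full; the proofs are below) =====
def Claim_equal_solution : Prop := ∀ (i : Int), Dom_solution i → Spec_solution i (solution i)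

-- ===== LEMMAS AND PROOFS =====

-- repeated-decimal-digit sum, the reference value for A's `sum(map(int, str(x)))`
def digsum (n : Nat) : Nat :=
  if n < 10 then n else digsum (n / 10) + n % 10
  termination_by n
  decreasing_by exact Nat.div_lt_self (by omega) (by omega)

theorem digsum_mod3 (n : Nat) : digsum n % 3 = n % 3 := by
  induction n using digsum.induct with
  | case1 n h => rw [digsum, if_pos h]
  | case2 n h ih => rw [digsum, if_neg h]; omega

theorem dv_digitChar : ∀ r < 10, (PySem.Int.ofChars? [Nat.digitChar r]).getD 0 = (r : Int) := by
  decide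

theorem tdc_sum (f : Nat) : ∀ (n : Nat) (ds : List Char), n < f →
    ((Nat.toDigitsCore 10 f n ds).map (fun c => (PySem.Int.ofChars? [c]).getD 0)).sum
      = (digsum n : Int) + ((ds.map (fun c => (PySem.Int.ofChars? [c]).getD 0)).sum) := by
  induction f with
  | zero => intro n ds h; omega
  | succ f ih =>
    intro n ds h
    rw [Nat.toDigitsCore]
    by_cases h0 : n / 10 = 0
    · have hn : n < 10 := by omega
      simp only [h0, if_true, List.map_cons, List.sum_cons]
      rw [dv_digitChar _ (by omega), digsum, if_pos hn]
      have : n % 10 = n := by omega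
      rw [this]
    · simp only [h0, if_false]
      rw [ih (n / 10) _ (by omega)]
      simp only [List.map_cons, List.sum_cons]
      rw [dv_digitChar _ (by omega)]
      conv_rhs => rw [digsum]
      rw [if_neg (by omega)]
      push_cast
      ring

theorem aDigitSum_eq (x : Int) (hx : 0 ≤ x) : aDigitSum x = (digsum x.toNat : Int) := by
  unfold aDigitSum PySem.Int.toChars
  rw [if_neg (by omega)]
  unfold Nat.toDigits
  rw [tdc_sum _ _ _ (Nat.lt_succ_self _)]
  simp

-- A's prime-list test characterised: with pl = the primes in [2, x), the for-with-break
-- finds no divisor exactly when x is prime.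
theorem anyDiv_eq_false_iff (x : Int) (hx : 2 ≤ x) (pl : List Int)
    (hpl : ∀ y : Int, y ∈ pl ↔ 2 ≤ y ∧ y < x ∧ Nat.Prime y.toNat) :
    (pl.any (fun y => PySem.Int.mod x y == 0) = false) ↔ Nat.Prime x.toNat := by
  simp only [List.any_eq_false, beq_iff_eq]
  constructor
  · intro h
    by_contra hnp
    have h1 : x.toNat ≠ 1 := by omega
    have hp := Nat.minFac_prime h1
    have hdvd := Nat.minFac_dvd x.toNat
    have hne : x.toNat.minFac ≠ x.toNat := by
      intro he; exact hnp ((Nat.prime_def_minFac.mpr ⟨by omega, he⟩))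
    have hle : x.toNat.minFac ≤ x.toNat := Nat.minFac_le (by omega)
    have hmem : (x.toNat.minFac : Int) ∈ pl := by
      rw [hpl]
      refine ⟨by exact_mod_cast hp.two_le, by omega, by simpa using hp⟩
    apply h _ hmem
    rw [PySem.Int.mod_eq_zero_iff_dvd]
    have : (x.toNat.minFac : Int) ∣ (x.toNat : Int) := Int.natCast_dvd_natCast.mpr hdvd
    simpa [Int.toNat_of_nonneg (by omega : (0:Int) ≤ x)] using this
  · intro hp y hy hmod
    rw [PySem.Int.mod_eq_zero_iff_dvd] at hmod
    obtain ⟨hy2, hyx, hyp⟩ := (hpl y).mp hy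
    have hyd : y.toNat ∣ x.toNat := by
      have h1 : ((y.toNat : Int)) ∣ ((x.toNat : Int)) := by
        rwa [Int.toNat_of_nonneg (by omega : (0:Int) ≤ y),
             Int.toNat_of_nonneg (by omega : (0:Int) ≤ x)]
      exact_mod_cast h1
    rcases hp.eq_one_or_self_of_dvd y.toNat hyd with h | h
    · omega
    · omega

theorem evenFilter_false (x : Int) (hx : 2 ≤ x) (hp : Nat.Prime x.toNat) :
    ((!(x == 2)) && (PySem.Int.mod x 2 == 0)) = false := by
  by_cases h2 : x = 2
  · simp [h2]
  · simp only [Bool.and_eq_false_iff]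
    right
    rw [beq_eq_false_iff_ne]
    intro hmod
    rw [PySem.Int.mod_eq_zero_iff_dvd] at hmod
    have : (2 : Nat) ∣ x.toNat := by
      have : ((2:Nat) : Int) ∣ ((x.toNat : Int)) := by
        rwa [Int.toNat_of_nonneg (by omega : (0:Int) ≤ x)]; 
      exact_mod_cast this
    rcases hp.eq_one_or_self_of_dvd 2 this with h | h <;> omega

theorem digitFilter_false (x : Int) (hx : 2 ≤ x) (hp : Nat.Prime x.toNat) :
    ((PySem.Int.mod (aDigitSum x) 3 == 0) && (!(x == 3))) = false := by
  by_cases h3 : x = 3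
  · simp [h3]
  · simp only [Bool.and_eq_false_iff]
    left
    rw [beq_eq_false_iff_ne]
    intro hmod
    rw [PySem.Int.mod_eq_zero_iff_dvd, aDigitSum_eq x (by omega)] at hmod
    have h3d : (3 : Nat) ∣ digsum x.toNat := by exact_mod_cast hmod
    have hx3 : (3 : Nat) ∣ x.toNat := by
      have := digsum_mod3 x.toNat
      omega
    rcases hp.eq_one_or_self_of_dvd 3 hx3 with h | h <;> omega

theorem guard_any (pl : List Int) (g : Int → Bool) :
    (if PySem.List.len pl > 0 then pl.any g else false) = pl.any g := by
  cases pl <;> simp [PySem.List.len]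

theorem trial_vacuous (x d : Int) (hd : 2 ≤ d) (hlt : x < d * d) :
    ∀ e : Int, d ≤ e → e * e ≤ x → ¬ e ∣ x := by
  intro e he hee _
  nlinarith

theorem isPrimeLoop_eq_true_iff (x d : Int) (hd : 2 ≤ d) :
    isPrimeLoop x d = true ↔ ∀ e : Int, d ≤ e → e * e ≤ x → ¬ e ∣ x := by
  have main : ∀ k : Nat, ∀ d : Int, 2 ≤ d → (x - d).toNat ≤ k →
      (isPrimeLoop x d = true ↔ ∀ e : Int, d ≤ e → e * e ≤ x → ¬ e ∣ x) := by
    intro k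
    induction k with
    | zero =>
      intro d hd hk
      have hxd : x ≤ d := by omega
      have hlt : x < d * d := by nlinarith
      rw [isPrimeLoop, dif_neg (by rintro ⟨-, h2⟩; omega)]
      simp only [true_iff]
      exact trial_vacuous x d hd hlt
    | succ k ihk =>
      intro d hd hk
      rw [isPrimeLoop]
      by_cases hg : 2 ≤ d ∧ d * d ≤ x
      · rw [dif_pos hg]
        have h2d : 2 * d ≤ d * d := by nlinarith
        by_cases hm : PySem.Int.mod x d == 0
        · have hdv : d ∣ x := (PySem.Int.mod_eq_zero_iff_dvd x d).mp (by simpa using hm)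
          rw [if_pos hm]
          constructor
          · intro habs; exact absurd habs (by simp)
          · intro hall; exact absurd hdv (hall d le_rfl hg.2)
        · rw [if_neg hm]
          rw [ihk (d + 1) (by omega) (by have := hg.2; omega)]
          constructor
          · intro h' e hde hee
            rcases eq_or_lt_of_le hde with rfl | hlt
            · intro hdvd
              exact hm (by simp [(PySem.Int.mod_eq_zero_iff_dvd _ _).mpr hdvd])
            · exact h' e (by omega) hee
          · intro h' e hde hee
            exact h' e (by omega) hee
      · rw [dif_neg hg]
        have hlt : x < d * d := by
          rcases not_and_or.mp hg with h1 | h1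
          · omega
          · omega
        simp only [true_iff]
        exact trial_vacuous x d hd hlt
  exact main (x - d).toNat d hd le_rfl

theorem isPrime_iff (x : Int) (hx : 2 ≤ x) : isPrime x = true ↔ Nat.Prime x.toNat := by
  obtain ⟨m, rfl⟩ : ∃ m : Nat, x = (m : Int) := ⟨x.toNat, (Int.toNat_of_nonneg (by omega)).symm⟩
  have hm : 2 ≤ m := by exact_mod_cast hx
  unfold isPrime
  rw [if_neg (by omega), isPrimeLoop_eq_true_iff _ 2 le_rfl, Nat.prime_def_le_sqrt]
  simp only [Int.toNat_natCast]
  constructor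
  · intro h
    refine ⟨hm, fun k hk hks hdvd => ?_⟩
    refine h (k : Int) (by exact_mod_cast hk) ?_ (by exact_mod_cast hdvd)
    exact_mod_cast Nat.le_sqrt.mp hks
  · rintro ⟨-, h⟩ e he hee hdvd
    obtain ⟨k, rfl⟩ : ∃ k : Nat, e = (k : Int) := ⟨e.toNat, (Int.toNat_of_nonneg (by omega)).symm⟩
    exact h k (by exact_mod_cast he) (Nat.le_sqrt.mpr (by exact_mod_cast hee))
      (by exact_mod_cast hdvd)

-- the two loops, run with the same fuel from related states, build the same string
theorem loop_eq (f : Nat) : ∀ (s : List Char) (pl : List Int) (x : Int)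
    (parts : List (List Char)),
    1 ≤ x → s = parts.flatten →
    (∀ y : Int, y ∈ pl ↔ 2 ≤ y ∧ y < x + 1 ∧ Nat.Prime y.toNat) →
    aLoop f s pl x = (bLoop f parts (s.length : Int) (x + 1)).flatten := by
  induction f with
  | zero => intro s pl x parts _ hs _; rw [aLoop, bLoop, hs]
  | succ f ih =>
    intro s pl x parts hx hs hpl
    rw [aLoop, bLoop]
    simp only [guard_any]
    simp only [PySem.List.len_eq]
    by_cases hlen : (s.length : Int) < 10005
    · rw [if_pos hlen, if_pos hlen]
      by_cases hp : Nat.Prime (x + 1).toNat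
      · have hany : pl.any (fun y => PySem.Int.mod (x + 1) y == 0) = false :=
          (anyDiv_eq_false_iff (x + 1) (by omega) pl (by simpa using hpl)).mpr hp
        simp only [hany, evenFilter_false (x + 1) (by omega) hp,
          digitFilter_false (x + 1) (by omega) hp, Bool.false_eq_true, if_false]
        rw [if_pos ((isPrime_iff (x + 1) (by omega)).mpr hp)]
        have := ih (s ++ PySem.Int.toChars (x + 1)) (pl ++ [x + 1]) (x + 1)
          (parts ++ [PySem.Int.toChars (x + 1)]) (by omega)
          (by simp [hs]) ?hpl'
        · rw [this]
          congr 2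
          simp
        case hpl' =>
          intro y
          simp only [List.mem_append, List.mem_singleton, hpl]
          constructor
          · rintro (⟨h1, h2, h3⟩ | rfl)
            · exact ⟨h1, by omega, h3⟩
            · exact ⟨by omega, by omega, hp⟩
          · rintro ⟨h1, h2, h3⟩
            by_cases hy : y = x + 1
            · right; exact hy
            · left; exact ⟨h1, by omega, h3⟩
      · have hany : pl.any (fun y => PySem.Int.mod (x + 1) y == 0) = true := by
          rcases Bool.eq_false_or_eq_true (pl.any (fun y => PySem.Int.mod (x + 1) y == 0)) with h | h
          · exact h
          · exact absurd ((anyDiv_eq_false_iff (x + 1) (by omega) pl (by simpa using hpl)).mp h) hp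
        simp only [hany, if_true]
        rw [if_neg (by simp [isPrime_iff (x + 1) (by omega), hp])]
        exact ih s pl (x + 1) parts (by omega) hs (by
          intro y
          rw [hpl]
          constructor
          · rintro ⟨h1, h2, h3⟩; exact ⟨h1, by omega, h3⟩
          · rintro ⟨h1, h2, h3⟩
            refine ⟨h1, ?_, h3⟩
            by_cases hy : y = x + 1
            · exact absurd (hy ▸ h3) hp
            · omega)
    · rw [if_neg hlen, if_neg hlen, hs]

-- ===== VERDICT (by name: the statement is the Claim_ definition above) =====
theorem solution_spec : Claim_equal_solution := by
  intro i _
  unfold Spec_solution solution solution_alt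
  by_cases hi : 0 ≤ i ∧ i ≤ 10000
  · rw [if_neg (by omega), if_neg (by omega)]
    have h := loop_eq 30000 [] [] 1 [] (by omega) (by simp) (by intro y; simp; omega)
    simp only [List.length_nil, Int.natCast_zero] at h
    rw [h]
    norm_num
  · rw [if_pos (by omega), if_pos (by omega)]
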